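-- pv_equiv track=rewrite | github.com/Archana914/medical-decease-sysytem2 | main_project.py | related_diseases
-- ===== SOURCE A (Python) =====
-- from collections import defaultdict, deque
--
-- def related_diseases(symptom):
--     graph = defaultdict(list)
--     graph["fever"].extend(["cold", "malaria"])
--     graph["cough"].extend(["cold", "flu"])
--     graph["headache"].extend(["flu", "migraine"])
--     graph["nausea"].extend(["food poisoning", "malaria"])
--
--     visited = set()
--     q = deque([symptom])
--     result = []
--
--     while q:
--         node = q.popleft()
--         if node not in visited:
--             visited.add(node)
--             for neighbour in graph.get(node, []):
--                 if neighbour not in visited: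
--                     result.append(neighbour)
--                     q.append(neighbour)
--     return result
-- ===== SOURCE B (Python) =====
-- def related_diseases(symptom):
--     mapping = {
--         "fever": ["cold", "malaria"],
--         "cough": ["cold", "flu"],
--         "headache": ["flu", "migraine"],
--         "nausea": ["food poisoning", "malaria"],
--     }
--     return list(mapping.get(symptom, []))
-- ===== Notes on version B (the rewrite author's own statement) =====
-- stated objective: simpler
-- what changed: Replaced the BFS (deque, visited set, loop) over the fixed two-level symptom->disease graph with a single dict lookup returning a fresh copy, since every disease is a leaf and the BFS only ever emits the direct neighbours of the symptom.
import Mathlib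
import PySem

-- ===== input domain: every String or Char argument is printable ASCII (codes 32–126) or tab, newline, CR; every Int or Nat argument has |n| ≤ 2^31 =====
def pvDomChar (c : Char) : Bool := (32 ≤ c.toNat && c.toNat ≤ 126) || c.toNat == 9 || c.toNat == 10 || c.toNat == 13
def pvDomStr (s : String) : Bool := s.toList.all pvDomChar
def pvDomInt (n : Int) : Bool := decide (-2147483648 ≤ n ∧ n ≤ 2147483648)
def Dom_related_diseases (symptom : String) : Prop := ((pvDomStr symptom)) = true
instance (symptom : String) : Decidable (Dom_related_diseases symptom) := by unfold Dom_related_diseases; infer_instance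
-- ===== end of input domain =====

-- B replaces A's BFS (queue + visited set) over the fixed two-level graph by a single
-- dict lookup with a copied list; objective: simpler.

-- ===== PORT A =====
-- the fixed graph built by the defaultdict extends (no disease is a key)
def pvGraphA : PySem.Dict String (List String) :=
  ((((PySem.Dict.empty).insert "fever" ["cold", "malaria"]).insert "cough"
      ["cold", "flu"]).insert "headache" ["flu", "migraine"]).insert "nausea"
      ["food poisoning", "malaria"]

-- the while loop; fuel only makes the recursion total (9 enqueues at most occur in Python)
def pvBfsLoop (visited : PySem.Set String) (q : List String) (result : List String)
    (fuel : Nat) : List String :=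
  match fuel, q with
  | 0, _ => result
  | _ + 1, [] => result
  | fuel + 1, node :: qrest =>
    if visited.contains node then pvBfsLoop visited qrest result fuel
    else
      let visited' := visited.add node
      let step := (pvGraphA.getD node []).foldl
        (fun (p : List String × List String) neighbour =>
          if visited'.contains neighbour then p
          else (p.1 ++ [neighbour], p.2 ++ [neighbour])) (result, qrest)
      pvBfsLoop visited' step.2 step.1 fuel

def related_diseases (symptom : String) : List String :=
  pvBfsLoop PySem.Set.empty [symptom] [] 16

-- ===== PORT B =====
def pvMappingB : PySem.Dict String (List String) :=
  PySem.Dict.ofList [("fever", ["cold", "malaria"]), ("cough", ["cold", "flu"]),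
    ("headache", ["flu", "migraine"]), ("nausea", ["food poisoning", "malaria"])]

def related_diseases_alt (symptom : String) : List String :=
  pvMappingB.getD symptom []

-- ===== PRECONDITION & SPEC =====
def Spec_related_diseases (symptom : String) (out : List String) : Prop := out = related_diseases_alt symptom
instance (symptom : String) (out : List String) : Decidable (Spec_related_diseases symptom out) := by unfold Spec_related_diseases; infer_instance

-- ===== CLAIM (what is proved, stated in full; the proofs are below) =====
def Claim_equal_related_diseases : Prop := ∀ (symptom : String), Dom_related_diseases symptom → Spec_related_diseases symptom (related_diseases symptom)

-- ===== LEMMAS AND PROOFS =====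

theorem related_default (s : String) (h1 : s ≠ "fever") (h2 : s ≠ "cough")
    (h3 : s ≠ "headache") (h4 : s ≠ "nausea") :
    related_diseases s = [] ∧ related_diseases_alt s = [] := by
  have e1 : (("fever" : String) == s) = false := by simp [Ne.symm h1]
  have e2 : (("cough" : String) == s) = false := by simp [Ne.symm h2]
  have e3 : (("headache" : String) == s) = false := by simp [Ne.symm h3]
  have e4 : (("nausea" : String) == s) = false := by simp [Ne.symm h4]
  have g : pvGraphA.getD s [] = [] := by
    simp [pvGraphA, PySem.Dict.getD, PySem.Dict.get?, PySem.Dict.insert, PySem.Dict.empty,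
      PySem.Dict.contains, List.find?, e1, e2, e3, e4]
  have m : pvMappingB.getD s [] = [] := by
    simp [pvMappingB, PySem.Dict.getD, PySem.Dict.get?, PySem.Dict.ofList, PySem.Dict.insert,
      PySem.Dict.update, PySem.Dict.empty, PySem.Dict.contains, List.foldl, List.find?,
      e1, e2, e3, e4]
  refine ⟨?_, m⟩
  simp [related_diseases, pvBfsLoop, PySem.Set.contains, PySem.Set.empty, g]

-- ===== VERDICT (by name: the statement is the Claim_ definition above) =====
theorem related_diseases_spec : Claim_equal_related_diseases := by
  intro s _
  unfold Spec_related_diseases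
  by_cases h1 : s = "fever"; · subst h1; decide
  by_cases h2 : s = "cough"; · subst h2; decide
  by_cases h3 : s = "headache"; · subst h3; decide
  by_cases h4 : s = "nausea"; · subst h4; decide
  obtain ⟨ha, hb⟩ := related_default s h1 h2 h3 h4
  rw [ha, hb]
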